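-- pv_equiv track=rewrite | github.com/CarterKekoa/AssociationRuleMining | mysklearn/myutils.py | att_necessary
-- ===== SOURCE A (Python) =====
-- def att_necessary(table):
--     if(same_length(table) == False):
--         return False
--     already_seen = []
--     for i in range(len(table[0])):
--         column = [row[i] for row in table]
--         vals = get_unique(column)
--         for val in vals:
--             if val not in already_seen:
--                 already_seen.append(val)
--             else:
--                 return True
--     return False
--
-- def same_length(table):
--     counter = 0
--     length = len(table[0])
--     for row in table:
--         if len(row) == length:
--             counter += 1
--     if counter == len(table):
--         return True
--     return False
--
-- def get_unique(vals):
--     unique = []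
--     for val in vals:
--         if val not in unique:
--             unique.append(val)
--     return unique
-- ===== SOURCE B (Python) =====
-- def att_necessary(table):
--     # cardinality argument: some value occurs in two distinct columns
--     # iff the per-column distinct counts sum to more than the overall distinct count
--     if not table or any(len(row) != len(table[0]) for row in table):
--         return False
--     cols = [{row[i] for row in table} for i in range(len(table[0]))]
--     union = set()
--     total = 0
--     for c in cols:
--         total += len(c)
--         union |= c
--     return total > len(union)
-- ===== Notes on version B (the rewrite author's own statement) =====
-- stated objective: alternative
-- what changed: Replaces A's running already-seen membership scan with early return by a cardinality comparison: sum of per-column distinct counts versus the size of the union of all columns' value sets.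
import Mathlib
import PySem

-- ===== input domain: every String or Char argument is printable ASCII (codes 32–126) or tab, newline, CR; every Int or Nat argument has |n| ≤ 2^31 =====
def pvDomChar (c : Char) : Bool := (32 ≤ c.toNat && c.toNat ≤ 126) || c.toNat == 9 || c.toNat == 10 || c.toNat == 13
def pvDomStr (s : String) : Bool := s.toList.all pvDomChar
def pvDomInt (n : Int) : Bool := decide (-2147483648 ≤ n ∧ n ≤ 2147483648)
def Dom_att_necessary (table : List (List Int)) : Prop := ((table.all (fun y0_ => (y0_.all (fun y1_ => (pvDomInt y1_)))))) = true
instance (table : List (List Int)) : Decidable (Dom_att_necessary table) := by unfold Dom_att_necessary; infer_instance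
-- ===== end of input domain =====

-- B replaces A's running already-seen membership loop by a cardinality comparison
-- (sum of per-column distinct counts vs size of the union of all columns): alternative algorithm.

-- ===== PORT A =====
-- get_unique(vals): ordered dedup by a membership-checked append loop
def get_unique (vals : List Int) : List Int :=
  vals.foldl (fun u v => if v ∈ u then u else u ++ [v]) []

-- same_length(table): counts rows whose length equals len(table[0]); on [] Python raises
-- IndexError at len(table[0]) (excluded by Pre_), headD [] is a placeholder there.
def same_length (table : List (List Int)) : Bool :=
  let length := (table.headD []).length
  let counter : Int := table.foldl (fun c row => if row.length = length then c + 1 else c) 0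
  counter == (table.length : Int)

-- inner 'for val in vals: if val not in already_seen: append else: return True';
-- none models the early 'return True'
def att_inner (seen : List Int) : List Int → Option (List Int)
  | [] => some seen
  | v :: vs => if v ∉ seen then att_inner (seen ++ [v]) vs else none

-- outer 'for i in range(len(table[0]))'; row[i] is in range under the same_length guard,
-- so row.getD i 0 is Python's row[i] on every input the loop is reached on
def att_go (table : List (List Int)) (seen : List Int) : List Nat → Bool
  | [] => false
  | i :: rest =>
    let column := table.map (fun row => row.getD i 0)
    let vals := get_unique column
    match att_inner seen vals with
    | none => true
    | some seen' => att_go table seen' rest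

def att_necessary (table : List (List Int)) : Bool :=
  if same_length table = false then false
  else att_go table [] (List.range (table.headD []).length)

-- ===== PORT B =====
def att_necessary_alt (table : List (List Int)) : Bool :=
  if table.isEmpty || table.any (fun row => row.length ≠ (table.headD []).length) then false
  else
    let cols : List (PySem.Set Int) := (List.range (table.headD []).length).map
      (fun i => PySem.Set.ofList (table.map (fun row => row.getD i 0)))
    let tu : Nat × PySem.Set Int :=
      cols.foldl (fun acc c => (acc.1 + c.length, PySem.Set.union acc.2 c)) (0, PySem.Set.empty)
    decide (tu.2.length < tu.1)

-- ===== PRECONDITION & SPEC =====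
-- Pre_ excludes only the empty table, on which Python A raises IndexError at len(table[0]).
def Pre_att_necessary (table : List (List Int)) : Prop := table ≠ []
instance (table : List (List Int)) : Decidable (Pre_att_necessary table) := by
  unfold Pre_att_necessary; infer_instance
def pvWitness_att_necessary : List (List Int) := [[1, 2], [1, 3]]

def Spec_att_necessary (table : List (List Int)) (out : Bool) : Prop := out = att_necessary_alt table
instance (table : List (List Int)) (out : Bool) : Decidable (Spec_att_necessary table out) := by
  unfold Spec_att_necessary; infer_instance

-- ===== CLAIM (what is proved, stated in full; the proofs are below) =====
def Claim_equal_att_necessary : Prop := ∀ (table : List (List Int)), Dom_att_necessary table → Pre_att_necessary table → Spec_att_necessary table (att_necessary table)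

-- ===== LEMMAS AND PROOFS =====

theorem get_unique_eq_ofList (vals : List Int) : get_unique vals = PySem.Set.ofList vals := by
  have h : (fun (u : List Int) v => if v ∈ u then u else u ++ [v]) = PySem.Set.add := by
    funext u v
    rw [PySem.Set.add_eq_ite]
  rw [get_unique, h, PySem.Set.ofList_eq_foldl]

theorem att_inner_spec (vals : List Int) (hv : vals.Nodup) (seen : List Int) :
    att_inner seen vals = if ∀ v ∈ vals, v ∉ seen then some (seen ++ vals) else none := by
  induction vals generalizing seen with
  | nil => simp [att_inner]
  | cons v vs ih =>
    rcases List.nodup_cons.mp hv with ⟨hvn, hvs⟩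
    by_cases hm : v ∈ seen
    · simp [att_inner, hm]
    · rw [att_inner]
      simp only [hm, not_false_eq_true, if_pos]
      rw [ih hvs]
      have : (∀ w ∈ vs, w ∉ seen ++ [v]) ↔ (∀ w ∈ v :: vs, w ∉ seen) := by
        constructor
        · intro h w hw
          rcases List.mem_cons.mp hw with rfl | hw'
          · exact hm
          · intro hs; exact h w hw' (List.mem_append_left _ hs)
        · intro h w hw hws
          rcases List.mem_append.mp hws with hs | hs
          · exact h w (List.mem_cons_of_mem _ hw) hs
          · have hwv : w = v := by simpa using hs
            exact hvn (hwv ▸ hw)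
      by_cases hall : ∀ w ∈ v :: vs, w ∉ seen
      · rw [if_pos (this.mpr hall), if_pos hall, List.append_assoc]
        simp
      · rw [if_neg (fun h => hall (this.mp h)), if_neg hall]

theorem length_update_le (s c : List Int) :
    (PySem.Set.update s c).length ≤ s.length + c.length := by
  rw [PySem.Set.update_eq_append_filter]
  have h1 := List.length_filter_le (fun y => !PySem.Set.contains s y) (PySem.Set.ofList c)
  have h2 := PySem.Set.length_ofList_le (α := Int) c
  simp only [List.length_append]
  omega

theorem length_foldl_update_le (cs : List (List Int)) (u : List Int) :
    (cs.foldl PySem.Set.update u).length ≤ u.length + (cs.map List.length).sum := by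
  induction cs generalizing u with
  | nil => simp
  | cons c cs ih =>
    simp only [List.foldl_cons, List.map_cons, List.sum_cons]
    have := ih (PySem.Set.update u c)
    have := length_update_le u c
    omega

theorem length_update_lt (s c : List Int) (hc : c.Nodup) (h : ∃ v ∈ c, v ∈ s) :
    (PySem.Set.update s c).length < s.length + c.length := by
  rw [PySem.Set.update_eq_append_filter, PySem.Set.ofList_eq_self_of_nodup c hc]
  simp only [List.length_append]
  have : (List.filter (fun y => !PySem.Set.contains s y) c).length < c.length := by
    rw [List.length_filter_lt_length_iff_exists]
    rcases h with ⟨v, hvc, hvs⟩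
    exact ⟨v, hvc, by simp [PySem.Set.contains_eq_listContains, hvs]⟩
  omega

-- A's outer loop on pre-extracted per-column value sets
def att_goB (seen : List Int) : List (List Int) → Bool
  | [] => false
  | c :: cs =>
    match att_inner seen c with
    | none => true
    | some seen' => att_goB seen' cs

theorem att_go_eq_goB (table : List (List Int)) (seen : List Int) (is : List Nat) :
    att_go table seen is
      = att_goB seen (is.map (fun i => get_unique (table.map (fun row => row.getD i 0)))) := by
  induction is generalizing seen with
  | nil => rfl
  | cons i rest ih =>
    rw [att_go, List.map_cons, att_goB]
    cases att_inner seen (get_unique (table.map (fun row => row.getD i 0))) with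
    | none => rfl
    | some s => exact ih s

theorem att_goB_card (cs : List (List Int)) (hcs : ∀ c ∈ cs, c.Nodup)
    (seen : List Int) (hs : seen.Nodup) :
    att_goB seen cs
      = decide ((cs.foldl PySem.Set.update seen).length < seen.length + (cs.map List.length).sum) := by
  induction cs generalizing seen with
  | nil => simp [att_goB]
  | cons c cs ih =>
    have hc : c.Nodup := hcs c (List.mem_cons_self)
    have hcs' : ∀ d ∈ cs, d.Nodup := fun d hd => hcs d (List.mem_cons_of_mem _ hd)
    rw [att_goB, att_inner_spec c hc seen]
    by_cases hall : ∀ v ∈ c, v ∉ seen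
    · rw [if_pos hall]
      have hupd : PySem.Set.update seen c = seen ++ c :=
        PySem.Set.update_eq_append_of_disjoint seen c hc hall
      have hnd : (seen ++ c).Nodup := by
        rw [List.nodup_append]
        refine ⟨hs, hc, ?_⟩
        intro v hv w hw
        exact fun heq => hall w hw (heq ▸ hv)
      simp only []
      rw [ih hcs' (seen ++ c) hnd]
      simp only [List.foldl_cons, List.map_cons, List.sum_cons, hupd, List.length_append,
        Nat.add_assoc]
    · rw [if_neg hall]
      simp only []
      have hex : ∃ v ∈ c, v ∈ seen := by
        by_contra hc
        exact hall (fun v hv hvs => hc ⟨v, hv, hvs⟩)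
      have h1 := length_foldl_update_le cs (PySem.Set.update seen c)
      have h2 := length_update_lt seen c hc hex
      simp only [List.foldl_cons, List.map_cons, List.sum_cons]
      symm
      rw [decide_eq_true_iff]
      omega

theorem foldl_pair (cs : List (PySem.Set Int)) (t : Nat) (u : PySem.Set Int) :
    cs.foldl (fun acc c => (acc.1 + c.length, PySem.Set.union acc.2 c)) (t, u)
      = (t + (cs.map List.length).sum, cs.foldl PySem.Set.update u) := by
  induction cs generalizing t u with
  | nil => simp
  | cons c cs ih =>
    simp only [List.foldl_cons, List.map_cons, List.sum_cons, ih]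
    exact congrArg₂ Prod.mk (by omega) rfl

theorem same_length_iff (table : List (List Int)) :
    same_length table = true ↔ ∀ row ∈ table, row.length = (table.headD []).length := by
  rw [same_length]
  simp only [beq_iff_eq]
  have hfun : (fun (c : Int) (row : List Int) => if row.length = (table.headD []).length then c + 1 else c)
      = (fun c row => if (decide (row.length = (table.headD []).length)) = true then c + 1 else c) := by
    funext c row
    simp
  rw [hfun, PySem.List.foldl_count_if (fun row => decide (row.length = (table.headD []).length)) table 0]
  rw [zero_add, Int.natCast_inj, List.countP_eq_length]
  simp

theorem att_necessary_spec : Claim_equal_att_necessary := by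
  intro table _hdom hpre
  unfold Spec_att_necessary att_necessary att_necessary_alt
  have hne : table.isEmpty = false := by
    cases table with
    | nil => exact absurd rfl hpre
    | cons r rs => rfl
  by_cases hall : ∀ row ∈ table, row.length = (table.headD []).length
  · have hsl : same_length table = true := (same_length_iff table).mpr hall
    have hany : table.any (fun row => row.length ≠ (table.headD []).length) = false := by
      simp only [List.any_eq_false]
      intro row hr
      simp [hall row hr]
    rw [hsl, hne, hany]
    simp only [Bool.or_self, Bool.false_eq_true, if_false]
    rw [att_go_eq_goB]
    set cs := (List.range (table.headD []).length).map
      (fun i => get_unique (table.map (fun row => row.getD i 0))) with hcsdef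
    have hcs : ∀ c ∈ cs, c.Nodup := by
      intro c hc
      rw [hcsdef] at hc
      rcases List.mem_map.mp hc with ⟨i, _, rfl⟩
      rw [get_unique_eq_ofList]
      exact PySem.Set.nodup_ofList _
    rw [att_goB_card cs hcs [] List.nodup_nil]
    have hcols : (List.range (table.headD []).length).map
        (fun i => PySem.Set.ofList (table.map (fun row => row.getD i 0))) = cs := by
      rw [hcsdef]
      exact List.map_congr_left (fun i _ => (get_unique_eq_ofList _).symm)
    rw [hcols, foldl_pair cs 0 PySem.Set.empty]
    simp [PySem.Set.empty]
  · have hsl : same_length table = false := by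
      rcases Bool.eq_false_or_eq_true (same_length table) with h | h
      · exact absurd ((same_length_iff table).mp h) hall
      · exact h
    have hany : table.any (fun row => row.length ≠ (table.headD []).length) = true := by
      have hex : ∃ row ∈ table, ¬ row.length = (table.headD []).length := by
        by_contra hc
        exact hall (fun r hr => by
          by_contra hne
          exact hc ⟨r, hr, hne⟩)
      rcases hex with ⟨row, hr, hlen⟩
      simp only [List.any_eq_true]
      exact ⟨row, hr, decide_eq_true hlen⟩
    rw [hsl, hne, hany]
    simp

-- ===== VERDICT (by name: the statement is the Claim_ definition above) =====
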